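-- pv_equiv track=rewrite | github.com/RNA4219/Day8 | workflow-cookbook/tools/context/pack.py | _candidate_neighbourhood
-- ===== SOURCE A (Python) =====
-- from collections import deque
-- from typing import Iterable, Mapping
--
-- def _candidate_neighbourhood(
--     nodes: list[Mapping[str, object]],
--     edges: Iterable[Mapping[str, object]],
--     seeds: set[str],
--     hops: int = 2,
-- ) -> set[str]:
--     adjacency: dict[str, set[str]] = {str(node["id"]): set() for node in nodes}
--     for edge in edges:
--         src = str(edge.get("src", ""))
--         dst = str(edge.get("dst", ""))
--         if src in adjacency and dst in adjacency:
--             adjacency[src].add(dst)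
--             adjacency[dst].add(src)
--     visited = set(seeds)
--     queue = deque((seed, 0) for seed in seeds)
--     while queue:
--         current, depth = queue.popleft()
--         if depth >= hops:
--             continue
--         for neighbour in adjacency.get(current, set()):
--             if neighbour in visited:
--                 continue
--             visited.add(neighbour)
--             queue.append((neighbour, depth + 1))
--     return visited
-- ===== SOURCE B (Python) =====
-- def _candidate_neighbourhood(nodes, edges, seeds, hops=2):
--     adjacency = {str(node["id"]): set() for node in nodes}
--     for edge in edges:
--         src = str(edge.get("src", ""))
--         dst = str(edge.get("dst", ""))
--         if src in adjacency and dst in adjacency: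
--             adjacency[src].add(dst)
--             adjacency[dst].add(src)
--     visited = set(seeds)
--     frontier = set(seeds)
--     for _ in range(hops):
--         if not frontier:
--             break
--         next_frontier = {
--             nbr
--             for node in frontier
--             for nbr in adjacency.get(node, set())
--             if nbr not in visited
--         }
--         visited |= next_frontier
--         frontier = next_frontier
--     return visited
-- ===== Notes on version B (the rewrite author's own statement) =====
-- stated objective: alternative
-- what changed: The depth-tagged deque BFS (a FIFO of (node, depth) pairs with a per-node depth guard) is replaced by a level-synchronous BFS: a bounded loop over at most `hops` levels that expands a whole frontier set into the next frontier and unions it into visited.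
import Mathlib
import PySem

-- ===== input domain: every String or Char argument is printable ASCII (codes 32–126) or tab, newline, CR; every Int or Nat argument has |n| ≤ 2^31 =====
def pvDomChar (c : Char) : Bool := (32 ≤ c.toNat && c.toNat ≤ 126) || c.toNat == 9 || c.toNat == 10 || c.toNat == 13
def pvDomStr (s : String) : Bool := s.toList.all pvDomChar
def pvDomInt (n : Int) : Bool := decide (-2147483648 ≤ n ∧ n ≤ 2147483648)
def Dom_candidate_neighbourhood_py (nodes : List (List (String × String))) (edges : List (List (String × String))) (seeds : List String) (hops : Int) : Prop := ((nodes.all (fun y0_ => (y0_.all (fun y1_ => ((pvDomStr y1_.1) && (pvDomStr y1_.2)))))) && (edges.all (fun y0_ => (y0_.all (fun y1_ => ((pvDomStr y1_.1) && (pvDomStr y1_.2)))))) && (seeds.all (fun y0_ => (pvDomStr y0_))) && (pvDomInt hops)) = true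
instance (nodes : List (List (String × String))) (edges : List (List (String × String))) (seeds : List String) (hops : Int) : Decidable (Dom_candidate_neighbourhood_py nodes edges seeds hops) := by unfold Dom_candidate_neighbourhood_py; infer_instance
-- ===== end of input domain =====

-- B replaces A's depth-tagged deque BFS with a level-synchronous frontier-set BFS (alternative decomposition, similar cost).


-- ===== PORT A =====
-- shared helper: the adjacency-building prelude (the identical first lines of both Pythons);
-- node["id"] / edge.get(...) are first-match assoc-list lookups; the "" default for "id" is only reached outside Pre_
def pvAdj (nodes : List (List (String × String))) (edges : List (List (String × String))) :
    PySem.Dict String (PySem.Set String) :=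
  let base : PySem.Dict String (PySem.Set String) :=
    nodes.foldl (fun d node => d.insert ((PySem.Dict.mk node).getD "id" "") PySem.Set.empty) PySem.Dict.empty
  edges.foldl (fun adj edge =>
    let src := (PySem.Dict.mk edge).getD "src" ""
    let dst := (PySem.Dict.mk edge).getD "dst" ""
    if adj.contains src && adj.contains dst then
      (adj.modify src PySem.Set.empty (fun s => PySem.Set.add s dst)).modify dst PySem.Set.empty
        (fun s => PySem.Set.add s src)
    else adj) base

-- in the initial adjacency dict every value is the empty set

-- A's while-loop over the deque of (node, depth) pairs; the fuel argument only makes the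
-- loop total (it bounds the number of pops and is proven sufficient by the lemmas below)
def pvBfsA (adj : PySem.Dict String (PySem.Set String)) (hops : Int) :
    Nat → List (String × Int) → PySem.Set String → PySem.Set String
  | 0, _, visited => visited
  | _ + 1, [], visited => visited
  | fuel + 1, (current, depth) :: rest, visited =>
    if hops ≤ depth then pvBfsA adj hops fuel rest visited
    else
      let st := (PySem.Dict.getD adj current PySem.Set.empty).foldl
        (fun (st : PySem.Set String × List (String × Int)) neighbour =>
          if PySem.Set.contains st.1 neighbour then st
          else (PySem.Set.add st.1 neighbour, st.2 ++ [(neighbour, depth + 1)]))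
        (visited, rest)
      pvBfsA adj hops fuel st.2 st.1

def candidate_neighbourhood_py (nodes : List (List (String × String))) (edges : List (List (String × String))) (seeds : List String) (hops : Int) : List String :=
  let adjacency := pvAdj nodes edges
  let visited := PySem.Set.ofList seeds
  let queue := seeds.map (fun seed => (seed, (0 : Int)))
  pvBfsA adjacency hops (seeds.length + hops.toNat * nodes.length + 1) queue visited

-- ===== PORT B =====
-- B's level loop: `for _ in range(hops)` with early break on an empty frontier
def pvBfsB (adj : PySem.Dict String (PySem.Set String)) :
    Nat → PySem.Set String → PySem.Set String → PySem.Set String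
  | 0, _, visited => visited
  | n + 1, frontier, visited =>
    if frontier.isEmpty then visited
    else
      let nextFrontier := frontier.foldl (fun nf node =>
        (PySem.Dict.getD adj node PySem.Set.empty).foldl
          (fun nf nbr => if PySem.Set.contains visited nbr then nf else PySem.Set.add nf nbr) nf)
        PySem.Set.empty
      pvBfsB adj n nextFrontier (PySem.Set.union visited nextFrontier)

def candidate_neighbourhood_py_alt (nodes : List (List (String × String))) (edges : List (List (String × String))) (seeds : List String) (hops : Int) : List String :=
  let adjacency := pvAdj nodes edges
  let visited := PySem.Set.ofList seeds
  pvBfsB adjacency hops.toNat visited visited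

-- ===== PRECONDITION & SPEC =====
-- Pre_ excludes (a) nodes without an "id" key, on which the Python A raises KeyError, and
-- (b) seeds lists with duplicate elements, which do not encode a value of the parameter's
-- Python type set[str] (the List String argument holds the set's distinct elements).
def Pre_candidate_neighbourhood_py (nodes : List (List (String × String))) (edges : List (List (String × String))) (seeds : List String) (hops : Int) : Prop :=
  seeds.Nodup ∧ ∀ node ∈ nodes, (PySem.Dict.mk node).contains "id" = true
instance (nodes : List (List (String × String))) (edges : List (List (String × String))) (seeds : List String) (hops : Int) : Decidable (Pre_candidate_neighbourhood_py nodes edges seeds hops) := by unfold Pre_candidate_neighbourhood_py; infer_instance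

def pvWitness_candidate_neighbourhood_py : (List (List (String × String))) × (List (List (String × String))) × List String × Int :=
  ([[("id", "a")], [("id", "b")], [("id", "c")]], [[("src", "a"), ("dst", "b")], [("src", "b"), ("dst", "c")]], ["a"], 1)

def Spec_candidate_neighbourhood_py (nodes : List (List (String × String))) (edges : List (List (String × String))) (seeds : List String) (hops : Int) (out : List String) : Prop := out = candidate_neighbourhood_py_alt nodes edges seeds hops
instance (nodes : List (List (String × String))) (edges : List (List (String × String))) (seeds : List String) (hops : Int) (out : List String) : Decidable (Spec_candidate_neighbourhood_py nodes edges seeds hops out) := by unfold Spec_candidate_neighbourhood_py; infer_instance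

-- ===== CLAIM (what is proved, stated in full; the proofs are below) =====
def Claim_equal_candidate_neighbourhood_py : Prop := ∀ (nodes : List (List (String × String))) (edges : List (List (String × String))) (seeds : List String) (hops : Int), Dom_candidate_neighbourhood_py nodes edges seeds hops → Pre_candidate_neighbourhood_py nodes edges seeds hops → Spec_candidate_neighbourhood_py nodes edges seeds hops (candidate_neighbourhood_py nodes edges seeds hops)

-- ===== LEMMAS AND PROOFS =====

theorem pvContains_append (v w : List String) (x : String) :
    PySem.Set.contains (v ++ w) x = (PySem.Set.contains v x || PySem.Set.contains w x) := by
  simp [PySem.Set.contains]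

theorem pvContains_false_iff (v : List String) (x : String) :
    PySem.Set.contains v x = false ↔ x ∉ v := by
  simp [PySem.Set.contains]

theorem pvAdd_of_not_contains (v : List String) (x : String)
    (h : PySem.Set.contains v x = false) : PySem.Set.add v x = v ++ [x] := by
  simp [PySem.Set.contains] at h
  simp [PySem.Set.add, PySem.Set.contains, h]

def pvExp1 (v : PySem.Set String) : List String → PySem.Set String × List String
  | [] => (v, [])
  | nbr :: t =>
    if PySem.Set.contains v nbr then pvExp1 v t
    else
      let r := pvExp1 (v ++ [nbr]) t
      (r.1, nbr :: r.2)

theorem pvExp1_spec (nbrs : List String) : ∀ (v : PySem.Set String),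
    (pvExp1 v nbrs).1 = v ++ (pvExp1 v nbrs).2 ∧ (pvExp1 v nbrs).2.Nodup ∧
    ∀ x ∈ (pvExp1 v nbrs).2, PySem.Set.contains v x = false ∧ x ∈ nbrs := by
  induction nbrs with
  | nil => intro v; simp [pvExp1]
  | cons nbr t ih =>
    intro v
    by_cases h : PySem.Set.contains v nbr
    · simp only [pvExp1, h, if_pos]
      obtain ⟨h1, h2, h3⟩ := ih v
      exact ⟨h1, h2, fun x hx => ⟨(h3 x hx).1, by simp [(h3 x hx).2]⟩⟩
    · rw [Bool.not_eq_true] at h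
      simp only [pvExp1, h, Bool.false_eq_true, if_false]
      obtain ⟨h1, h2, h3⟩ := ih (v ++ [nbr])
      have hne : ∀ x ∈ (pvExp1 (v ++ [nbr]) t).2, x ≠ nbr ∧ PySem.Set.contains v x = false := by
        intro x hx
        have := (h3 x hx).1
        rw [pvContains_append, Bool.or_eq_false_iff] at this
        refine ⟨?_, this.1⟩
        have := (pvContains_false_iff _ _).1 this.2
        simpa using this
      refine ⟨?_, ?_, ?_⟩
      · simpa [List.append_assoc] using h1
      · exact List.nodup_cons.2 ⟨fun hmem => (hne _ hmem).1 rfl, h2⟩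
      · intro x hx
        rcases List.mem_cons.1 hx with rfl | hx'
        · exact ⟨h, List.mem_cons_self⟩
        · exact ⟨(hne x hx').2, List.mem_cons_of_mem _ (h3 x hx').2⟩

def pvExpL (adj : PySem.Dict String (PySem.Set String)) (v : PySem.Set String) : List String → PySem.Set String × List String
  | [] => (v, [])
  | c :: t =>
    let e := pvExp1 v (PySem.Dict.getD adj c PySem.Set.empty)
    let r := pvExpL adj e.1 t
    (r.1, e.2 ++ r.2)

theorem pvExpL_spec (adj : PySem.Dict String (PySem.Set String)) (f : List String) :
    ∀ (v : PySem.Set String),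
    (pvExpL adj v f).1 = v ++ (pvExpL adj v f).2 ∧ (pvExpL adj v f).2.Nodup ∧
    ∀ x ∈ (pvExpL adj v f).2, PySem.Set.contains v x = false ∧
      ∃ c ∈ f, x ∈ PySem.Dict.getD adj c PySem.Set.empty := by
  induction f with
  | nil => intro v; simp [pvExpL]
  | cons c t ih =>
    intro v
    obtain ⟨e1, e2, e3⟩ := pvExp1_spec (PySem.Dict.getD adj c PySem.Set.empty) v
    obtain ⟨r1, r2, r3⟩ := ih (pvExp1 v (PySem.Dict.getD adj c PySem.Set.empty)).1
    simp only [pvExpL]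
    set e := pvExp1 v (PySem.Dict.getD adj c PySem.Set.empty) with he
    set r := pvExpL adj e.1 t with hr
    have hr3 : ∀ x ∈ r.2, PySem.Set.contains v x = false ∧ x ∉ e.2 := by
      intro x hx
      have := (r3 x hx).1
      rw [e1, pvContains_append, Bool.or_eq_false_iff] at this
      exact ⟨this.1, (pvContains_false_iff _ _).1 this.2⟩
    refine ⟨?_, ?_, ?_⟩
    · rw [r1, e1, List.append_assoc]
    · exact List.Nodup.append e2 r2 (fun x hx hx' => (hr3 x hx').2 hx)
    · intro x hx
      rcases List.mem_append.1 hx with hx' | hx'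
      · exact ⟨(e3 x hx').1, c, List.mem_cons_self, (e3 x hx').2⟩
      · obtain ⟨cc, hcc, hmem⟩ := (r3 x hx').2
        exact ⟨(hr3 x hx').1, cc, List.mem_cons_of_mem _ hcc, hmem⟩

theorem pvInnerA (d : Int) (nbrs : List String) : ∀ (v : PySem.Set String) (q : List (String × Int)),
    nbrs.foldl (fun (st : PySem.Set String × List (String × Int)) neighbour =>
        if PySem.Set.contains st.1 neighbour then st
        else (PySem.Set.add st.1 neighbour, st.2 ++ [(neighbour, d)])) (v, q)
      = ((pvExp1 v nbrs).1, q ++ (pvExp1 v nbrs).2.map (fun s => (s, d))) := by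
  induction nbrs with
  | nil => intro v q; simp [pvExp1]
  | cons nbr t ih =>
    intro v q
    by_cases h : PySem.Set.contains v nbr
    · simp only [List.foldl_cons, pvExp1, h, if_pos]
      exact ih v q
    · rw [Bool.not_eq_true] at h
      simp only [List.foldl_cons, pvExp1, h, Bool.false_eq_true, if_false]
      rw [pvAdd_of_not_contains v nbr h, ih]
      simp [List.append_assoc]

theorem pvInnerB (v : PySem.Set String) (nbrs : List String) : ∀ (nf0 : PySem.Set String),
    nbrs.foldl (fun nf nbr => if PySem.Set.contains v nbr then nf else PySem.Set.add nf nbr) nf0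
      = nf0 ++ (pvExp1 (v ++ nf0) nbrs).2 := by
  induction nbrs with
  | nil => intro nf0; simp [pvExp1]
  | cons nbr t ih =>
    intro nf0
    by_cases hv : PySem.Set.contains v nbr
    · have hc : PySem.Set.contains (v ++ nf0) nbr = true := by
        rw [pvContains_append, hv]; rfl
      simp only [List.foldl_cons, pvExp1, hv, hc, if_pos]
      exact ih nf0
    · rw [Bool.not_eq_true] at hv
      by_cases hn : PySem.Set.contains nf0 nbr
      · have hc : PySem.Set.contains (v ++ nf0) nbr = true := by
          rw [pvContains_append, hn, Bool.or_true]
        have hadd : PySem.Set.add nf0 nbr = nf0 := by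
          simp [PySem.Set.add, PySem.Set.contains] at hn ⊢
          simp [hn]
        simp only [List.foldl_cons, pvExp1, hv, hc, if_pos, Bool.false_eq_true, if_false, hadd]
        exact ih nf0
      · rw [Bool.not_eq_true] at hn
        have hc : PySem.Set.contains (v ++ nf0) nbr = false := by
          rw [pvContains_append, hv, hn]; rfl
        simp only [List.foldl_cons, pvExp1, hv, hc, Bool.false_eq_true, if_false]
        rw [pvAdd_of_not_contains nf0 nbr hn, ih]
        simp [List.append_assoc]

theorem pvLevelB (adj : PySem.Dict String (PySem.Set String)) (v : PySem.Set String)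
    (f : List String) : ∀ (nf0 : PySem.Set String),
    f.foldl (fun nf node =>
        (PySem.Dict.getD adj node PySem.Set.empty).foldl
          (fun nf nbr => if PySem.Set.contains v nbr then nf else PySem.Set.add nf nbr) nf) nf0
      = nf0 ++ (pvExpL adj (v ++ nf0) f).2 := by
  induction f with
  | nil => intro nf0; simp [pvExpL]
  | cons c t ih =>
    intro nf0
    simp only [List.foldl_cons, pvExpL]
    rw [pvInnerB, ih]
    have h1 := (pvExp1_spec (PySem.Dict.getD adj c PySem.Set.empty) (v ++ nf0)).1
    have h2 : v ++ (nf0 ++ (pvExp1 (v ++ nf0) (PySem.Dict.getD adj c PySem.Set.empty)).2)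
        = (pvExp1 (v ++ nf0) (PySem.Dict.getD adj c PySem.Set.empty)).1 := by
      rw [h1, List.append_assoc]
    rw [h2]
    simp [List.append_assoc]

theorem pvUnion_eq_append (t : List String) : ∀ (v : PySem.Set String),
    t.Nodup → (∀ x ∈ t, PySem.Set.contains v x = false) →
    PySem.Set.union v t = v ++ t := by
  induction t with
  | nil => intro v _ _; simp [PySem.Set.union, PySem.Set.update]
  | cons x r ih =>
    intro v hnd h
    have hx := h x List.mem_cons_self
    simp only [PySem.Set.union, PySem.Set.update, List.foldl_cons] at ih ⊢
    rw [pvAdd_of_not_contains v x hx, ih (v ++ [x]) (List.nodup_cons.1 hnd).2]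
    · simp
    · intro y hy
      rw [pvContains_append, Bool.or_eq_false_iff]
      refine ⟨h y (List.mem_cons_of_mem _ hy), ?_⟩
      rw [pvContains_false_iff]
      simp only [List.mem_singleton]
      rintro rfl
      exact (List.nodup_cons.1 hnd).1 hy

theorem pvBfsA_nil (adj : PySem.Dict String (PySem.Set String)) (hops : Int) (fuel : Nat)
    (v : PySem.Set String) : pvBfsA adj hops fuel [] v = v := by
  cases fuel <;> rfl

theorem pvBfsA_skip (adj : PySem.Dict String (PySem.Set String)) (hops : Int) (d : Int)
    (hd : hops ≤ d) (f : List String) : ∀ (fuel : Nat) (v : PySem.Set String),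
    f.length ≤ fuel → pvBfsA adj hops fuel (f.map (fun s => (s, d))) v = v := by
  induction f with
  | nil => intro fuel v _; rw [List.map_nil, pvBfsA_nil]
  | cons c t ih =>
    intro fuel v hfuel
    cases fuel with
    | zero => simp at hfuel
    | succ fu =>
      simp only [List.map_cons, pvBfsA, hd, if_pos]
      exact ih fu v (by simpa using Nat.succ_le_succ_iff.1 (by simpa using hfuel))

theorem pvLevelA (adj : PySem.Dict String (PySem.Set String)) (hops : Int) (d : Int)
    (hd : d < hops) (f1 : List String) : ∀ (f2 : List String) (v : PySem.Set String) (fuel : Nat),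
    f1.length ≤ fuel →
    pvBfsA adj hops fuel (f1.map (fun s => (s, d)) ++ f2.map (fun s => (s, d + 1))) v
      = pvBfsA adj hops (fuel - f1.length)
          ((f2 ++ (pvExpL adj v f1).2).map (fun s => (s, d + 1))) (pvExpL adj v f1).1 := by
  induction f1 with
  | nil => intro f2 v fuel _; simp [pvExpL]
  | cons c t ih =>
    intro f2 v fuel hfuel
    cases fuel with
    | zero => simp at hfuel
    | succ fu =>
      have hd' : ¬ hops ≤ d := not_le.2 hd
      simp only [List.map_cons, List.cons_append, pvBfsA, hd', if_false]
      rw [pvInnerA]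
      have hq : (t.map (fun s => (s, d)) ++ f2.map (fun s => (s, d + 1)))
            ++ (pvExp1 v (PySem.Dict.getD adj c PySem.Set.empty)).2.map (fun s => (s, d + 1))
          = t.map (fun s => (s, d))
            ++ (f2 ++ (pvExp1 v (PySem.Dict.getD adj c PySem.Set.empty)).2).map (fun s => (s, d + 1)) := by
        simp [List.append_assoc]
      rw [hq, ih _ _ fu (by simpa using Nat.succ_le_succ_iff.1 (by simpa using hfuel))]
      simp [pvExpL, List.append_assoc, Nat.succ_sub_succ]

theorem pvMain (adj : PySem.Dict String (PySem.Set String)) (hops : Int)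
    (Hadj : ∀ c x, x ∈ PySem.Dict.getD adj c PySem.Set.empty → x ∈ adj.keys) (n : Nat) :
    ∀ (fuel : Nat) (d : Int) (f : List String) (v : PySem.Set String),
    hops - d = (n : Int) → f.length + n * adj.keys.length ≤ fuel →
    pvBfsA adj hops fuel (f.map (fun s => (s, d))) v = pvBfsB adj n f v := by
  induction n with
  | zero =>
    intro fuel d f v hd hfuel
    have hle : hops ≤ d := by push_cast at hd; omega
    rw [pvBfsA_skip adj hops d hle f fuel v (by omega)]
    rfl
  | succ n ih =>
    intro fuel d f v hd hfuel
    have hdlt : d < hops := by push_cast at hd; omega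
    cases f with
    | nil => rw [List.map_nil, pvBfsA_nil]; simp [pvBfsB]
    | cons c t =>
      have hflen : (c :: t).length ≤ fuel := le_trans (Nat.le_add_right _ _) hfuel
      have hA := pvLevelA adj hops d hdlt (c :: t) [] v fuel hflen
      simp only [List.map_nil, List.append_nil, List.nil_append] at hA
      rw [hA]
      obtain ⟨E1, E2nd, E3⟩ := pvExpL_spec adj (c :: t) v
      have hBnext : (c :: t).foldl (fun nf node =>
          (PySem.Dict.getD adj node PySem.Set.empty).foldl
            (fun nf nbr => if PySem.Set.contains v nbr then nf else PySem.Set.add nf nbr) nf)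
          PySem.Set.empty = (pvExpL adj v (c :: t)).2 := by
        have := pvLevelB adj v (c :: t) PySem.Set.empty
        simpa [PySem.Set.empty] using this
      have hB : pvBfsB adj (n + 1) (c :: t) v
          = pvBfsB adj n (pvExpL adj v (c :: t)).2
              (PySem.Set.union v (pvExpL adj v (c :: t)).2) := by
        simp only [pvBfsB, List.isEmpty_cons, Bool.false_eq_true, if_false, hBnext]
      rw [hB, pvUnion_eq_append _ _ E2nd (fun x hx => (E3 x hx).1), ← E1]
      have hsub : (pvExpL adj v (c :: t)).2 ⊆ adj.keys := by
        intro x hx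
        obtain ⟨cc, _, hmem⟩ := (E3 x hx).2
        exact Hadj cc x hmem
      have hlen : (pvExpL adj v (c :: t)).2.length ≤ adj.keys.length :=
        (List.subperm_of_subset E2nd hsub).length_le
      rw [Nat.succ_mul] at hfuel
      exact ih (fuel - (c :: t).length) (d + 1) _ _ (by push_cast at hd ⊢; omega) (by omega)

theorem pvBase_getD (nodes : List (List (String × String))) :
    ∀ (d : PySem.Dict String (PySem.Set String)),
    (∀ c, d.getD c PySem.Set.empty = PySem.Set.empty) →
    ∀ c, (nodes.foldl (fun d node =>
        d.insert ((PySem.Dict.mk node).getD "id" "") PySem.Set.empty) d).getD c PySem.Set.empty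
      = PySem.Set.empty := by
  induction nodes with
  | nil => intro d h c; exact h c
  | cons node t ih =>
    intro d h c
    refine ih _ (fun c' => ?_) c
    rw [PySem.Dict.getD_insert]
    split
    · rfl
    · exact h c'

-- one step of the edge loop neither changes the key list nor adds a value element outside it

theorem pvEdgeFold_inv (edges : List (List (String × String))) :
    ∀ (d : PySem.Dict String (PySem.Set String)),
    (∀ c x, x ∈ d.getD c PySem.Set.empty → x ∈ d.keys) →
    (∀ c x, x ∈ (edges.foldl (fun adj edge =>
        let src := (PySem.Dict.mk edge).getD "src" ""
        let dst := (PySem.Dict.mk edge).getD "dst" ""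
        if adj.contains src && adj.contains dst then
          (adj.modify src PySem.Set.empty (fun s => PySem.Set.add s dst)).modify dst PySem.Set.empty
            (fun s => PySem.Set.add s src)
        else adj) d).getD c PySem.Set.empty → x ∈ (edges.foldl (fun adj edge =>
        let src := (PySem.Dict.mk edge).getD "src" ""
        let dst := (PySem.Dict.mk edge).getD "dst" ""
        if adj.contains src && adj.contains dst then
          (adj.modify src PySem.Set.empty (fun s => PySem.Set.add s dst)).modify dst PySem.Set.empty
            (fun s => PySem.Set.add s src)
        else adj) d).keys)
    ∧ (edges.foldl (fun adj edge =>
        let src := (PySem.Dict.mk edge).getD "src" ""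
        let dst := (PySem.Dict.mk edge).getD "dst" ""
        if adj.contains src && adj.contains dst then
          (adj.modify src PySem.Set.empty (fun s => PySem.Set.add s dst)).modify dst PySem.Set.empty
            (fun s => PySem.Set.add s src)
        else adj) d).keys = d.keys := by
  induction edges with
  | nil => intro d h; exact ⟨h, rfl⟩
  | cons edge t ih =>
    intro d h
    simp only [List.foldl_cons]
    set src := (PySem.Dict.mk edge).getD "src" "" with hsrc
    set dst := (PySem.Dict.mk edge).getD "dst" "" with hdst
    by_cases hc : d.contains src ∧ d.contains dst
    · have hcc : (d.contains src && d.contains dst) = true := by simp [hc.1, hc.2]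
      simp only [hcc, if_pos]
      set d' := (d.modify src PySem.Set.empty (fun s => PySem.Set.add s dst)).modify dst
          PySem.Set.empty (fun s => PySem.Set.add s src) with hd'
      have hkeys : d'.keys = d.keys := by
        rw [hd', PySem.Dict.keys_modify,
          PySem.Dict.keys_insert_of_contains _ _ (by
            rw [PySem.Dict.contains_modify]
            simp [hc.2]),
          PySem.Dict.keys_modify,
          PySem.Dict.keys_insert_of_contains _ _ hc.1]
      have hinv : ∀ c x, x ∈ d'.getD c PySem.Set.empty → x ∈ d'.keys := by
        intro c x hx
        rw [hkeys]
        rw [hd', PySem.Dict.getD_modify] at hx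
        by_cases h1 : c = dst
        · rw [if_pos h1, PySem.Dict.getD_modify] at hx
          rw [PySem.Set.mem_add] at hx
          rcases hx with hx | rfl
          · by_cases h2 : dst = src
            · rw [if_pos h2, PySem.Set.mem_add] at hx
              rcases hx with hx | rfl
              · exact h _ _ hx
              · exact (PySem.Dict.contains_iff_mem_keys _ _).1 hc.2
            · rw [if_neg h2] at hx
              exact h _ _ hx
          · exact (PySem.Dict.contains_iff_mem_keys _ _).1 hc.1
        · rw [if_neg h1, PySem.Dict.getD_modify] at hx
          by_cases h2 : c = src
          · rw [if_pos h2, PySem.Set.mem_add] at hx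
            rcases hx with hx | rfl
            · exact h _ _ hx
            · exact (PySem.Dict.contains_iff_mem_keys _ _).1 hc.2
          · rw [if_neg h2] at hx
            exact h _ _ hx
      obtain ⟨ih1, ih2⟩ := ih d' hinv
      exact ⟨ih1, by rw [ih2, hkeys]⟩
    · have hcc : (d.contains src && d.contains dst) = false := by
        cases hs : d.contains src <;> cases hd2 : d.contains dst <;> simp_all
      simp only [hcc, Bool.false_eq_true, if_false]
      exact ih d h

theorem pvAdj_values_sub (nodes : List (List (String × String))) (edges : List (List (String × String))) :
    ∀ c x, x ∈ PySem.Dict.getD (pvAdj nodes edges) c PySem.Set.empty → x ∈ (pvAdj nodes edges).keys := by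
  refine (pvEdgeFold_inv edges _ ?_).1
  intro c x hx
  rw [pvBase_getD nodes PySem.Dict.empty (fun c => PySem.Dict.getD_empty c _) c] at hx
  simp [PySem.Set.empty] at hx

theorem pvAdj_keys_le (nodes : List (List (String × String))) (edges : List (List (String × String))) :
    (pvAdj nodes edges).keys.length ≤ nodes.length := by
  have h2 := (pvEdgeFold_inv edges
    (nodes.foldl (fun d node => d.insert ((PySem.Dict.mk node).getD "id" "") PySem.Set.empty) PySem.Dict.empty)
    (by
      intro c x hx
      rw [pvBase_getD nodes PySem.Dict.empty (fun c => PySem.Dict.getD_empty c _) c] at hx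
      simp [PySem.Set.empty] at hx)).2
  show (pvAdj nodes edges).keys.length ≤ nodes.length
  rw [pvAdj]
  simp only []
  rw [h2, PySem.Dict.keys_foldl_insert_key nodes (fun node => (PySem.Dict.mk node).getD "id" "")
    (fun _ _ => PySem.Set.empty) PySem.Dict.empty]
  rw [PySem.Dict.keys_empty]
  calc (PySem.Set.update [] (nodes.map fun node => (PySem.Dict.mk node).getD "id" "")).length
      = (PySem.Set.ofList (nodes.map fun node => (PySem.Dict.mk node).getD "id" "")).length := rfl
    _ ≤ (nodes.map fun node => (PySem.Dict.mk node).getD "id" "").length := PySem.Set.length_ofList_le _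
    _ = nodes.length := List.length_map ..

theorem pvPorts_eq (nodes : List (List (String × String))) (edges : List (List (String × String))) (seeds : List String) (hops : Int) (hnd : seeds.Nodup) :
    candidate_neighbourhood_py nodes edges seeds hops = candidate_neighbourhood_py_alt nodes edges seeds hops := by
  unfold candidate_neighbourhood_py candidate_neighbourhood_py_alt
  simp only []
  rw [PySem.Set.ofList_eq_self_of_nodup seeds hnd]
  by_cases hh : hops ≤ 0
  · have h0 : hops.toNat = 0 := by omega
    rw [h0]
    rw [pvBfsA_skip _ hops 0 hh seeds _ _ (by omega)]
    rfl
  · have hmul := Nat.mul_le_mul_left hops.toNat (pvAdj_keys_le nodes edges)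
    exact pvMain (pvAdj nodes edges) hops (pvAdj_values_sub nodes edges) hops.toNat _ 0 seeds seeds
      (by omega) (by omega)

-- ===== VERDICT (by name: the statement is the Claim_ definition above) =====
theorem candidate_neighbourhood_py_spec : Claim_equal_candidate_neighbourhood_py := by
  intro nodes edges seeds hops _ hpre
  exact pvPorts_eq nodes edges seeds hops hpre.1
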